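-- pv_equiv track=rewrite | github.com/mobashirr/alx-interview | 0x0A-primegame/0-prime_game.py | req_sol
-- ===== SOURCE A (Python) =====
-- def req_sol(turn,primes):
--     '''
--     @primes: list of prime numbers
--     '''
--     if len(primes) == 0:
--         # base case which is the player don't have any prime number to choose
--         if turn == 1:
--             # this mean our p1 did not won
--             return False
--         else:
--             return True
--
--     winner = False
--     for prime in primes:
--         if turn == 1:
--             primes = list(filter(lambda x: (x != prime) and (x % prime != 0), primes))
--             winner  = req_sol(2,primes)
--         elif turn == 2:
--             primes = list(filter(lambda x: (x != prime) and (x % prime != 0), primes))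
--             winner = req_sol(1,primes)
--
--         if winner:
--             return False # this mean the base case returned True (that the first player don't have choise)
--
--     return True
-- ===== SOURCE B (Python) =====
-- def req_sol(turn, primes):
--     '''
--     @primes: list of prime numbers
--     '''
--     # In A, every recursive call collapses to the opposite player's base
--     # case, so the observable result depends only on `turn`.
--     return turn != 1
-- ===== Notes on version B (the rewrite author's own statement) =====
-- stated objective: simpler
-- what changed: Replaces A's recursive filter-and-search with the constant it always computes: A's first recursive probe always collapses to the opposite player's base case, so the returned value is exactly turn != 1.
import Mathlib
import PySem

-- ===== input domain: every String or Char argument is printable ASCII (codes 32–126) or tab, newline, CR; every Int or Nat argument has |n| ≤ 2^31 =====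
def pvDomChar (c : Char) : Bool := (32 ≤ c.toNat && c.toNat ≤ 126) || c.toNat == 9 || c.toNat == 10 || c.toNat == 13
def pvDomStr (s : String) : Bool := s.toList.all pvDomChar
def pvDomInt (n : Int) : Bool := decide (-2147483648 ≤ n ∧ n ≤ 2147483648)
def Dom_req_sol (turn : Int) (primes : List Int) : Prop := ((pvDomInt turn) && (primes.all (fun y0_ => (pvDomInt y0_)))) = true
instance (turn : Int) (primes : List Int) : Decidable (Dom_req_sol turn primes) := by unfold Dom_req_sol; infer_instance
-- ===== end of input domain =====

-- B replaces A's recursive filter-and-search by the constant value A always computes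
-- (A's first recursive probe collapses to the opposite player's base case), proved
-- equal to A on every input where A returns.

-- ===== PORT A =====
-- `list(filter(lambda x: (x != prime) and (x % prime != 0), primes))`
def reqFilter (p : Int) (xs : List Int) : List Int :=
  xs.filter (fun x => (x != p) && (PySem.Int.mod x p != 0))

-- `for prime in primes: …` — iterates the ORIGINAL list while `primes` (cur) rebinds;
-- `next` is the recursive call to req_sol at the remaining fuel
def reqLoop (next : Int → List Int → Bool) (turn : Int) : List Int → List Int → Bool
  | [], _ => true
  | p :: rest, cur =>
    if turn == 1 then
      let cur' := reqFilter p cur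
      let winner := next 2 cur'
      if winner then false else reqLoop next turn rest cur'
    else if turn == 2 then
      let cur' := reqFilter p cur
      let winner := next 1 cur'
      if winner then false else reqLoop next turn rest cur'
    else
      reqLoop next turn rest cur

-- the body of req_sol; fuel only makes the recursion total (primes.length + 1 suffices
-- on every input where the Python returns)
def reqSolFuel : Nat → Int → List Int → Bool
  | 0, _, _ => true
  | fuel + 1, turn, primes =>
    if primes.length == 0 then
      (if turn == 1 then false else true)
    else
      reqLoop (reqSolFuel fuel) turn primes primes

def req_sol (turn : Int) (primes : List Int) : Bool :=
  reqSolFuel (primes.length + 1) turn primes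

-- ===== PORT B =====
def req_sol_alt (turn : Int) (primes : List Int) : Bool :=
  turn != 1

-- ===== PRECONDITION & SPEC =====
-- exactly the inputs on which A's filter evaluates `x % 0`: a leading 0 with some
-- nonzero element when turn == 1; for turn == 2, a 0 in the list together with a
-- nonzero element that no entry before the first 0 equals or divides
def pvRaisesB (turn : Int) (primes : List Int) : Bool :=
  if turn == 1 then
    match primes with
    | [] => false
    | p :: _ => p == 0 && primes.any (fun x => x != 0)
  else if turn == 2 then
    primes.contains 0 &&
      primes.any (fun x =>
        x != 0 && (primes.takeWhile (fun v => v != 0)).all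
          (fun p => x != p && PySem.Int.mod x p != 0))
  else false

-- Pre_ excludes exactly the inputs on which A raises ZeroDivisionError
def Pre_req_sol (turn : Int) (primes : List Int) : Prop := pvRaisesB turn primes = false
instance (turn : Int) (primes : List Int) : Decidable (Pre_req_sol turn primes) := by
  unfold Pre_req_sol; infer_instance

def pvWitness_req_sol : Int × List Int := (1, [2, 3, 5])

def Spec_req_sol (turn : Int) (primes : List Int) (out : Bool) : Prop := out = req_sol_alt turn primes
instance (turn : Int) (primes : List Int) (out : Bool) : Decidable (Spec_req_sol turn primes out) := by unfold Spec_req_sol; infer_instance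

-- ===== CLAIM (what is proved, stated in full; the proofs are below) =====
def Claim_equal_req_sol : Prop := ∀ (turn : Int) (primes : List Int), Dom_req_sol turn primes → Pre_req_sol turn primes → Spec_req_sol turn primes (req_sol turn primes)

-- ===== LEMMAS AND PROOFS =====

lemma reqFilter_length_le (p : Int) (xs : List Int) :
    (reqFilter p xs).length ≤ xs.length :=
  List.length_filter_le _ _

lemma reqFilter_length_lt (p : Int) (xs : List Int) (hp : p ∈ xs) :
    (reqFilter p xs).length < xs.length := by
  unfold reqFilter
  apply List.length_filter_lt_length_iff_exists.mpr
  exact ⟨p, hp, by simp⟩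

-- a turn other than 1 and 2 never filters and never recurses: the loop returns True
lemma reqLoop_other (next : Int → List Int → Bool) (turn : Int) (h1 : turn ≠ 1) (h2 : turn ≠ 2) :
    ∀ (orig cur : List Int), reqLoop next turn orig cur = true := by
  intro orig
  induction orig with
  | nil => intro cur; simp [reqLoop]
  | cons p rest ih =>
    intro cur
    rw [reqLoop, if_neg (by simp [h1]), if_neg (by simp [h2])]
    exact ih cur

-- turn = 2: every probe req_sol(1, cur') answers False, so the loop returns True
lemma reqLoop_two (fuel : Nat)
    (IH : ∀ (t : Int) (ys : List Int), ys.length < fuel → reqSolFuel fuel t ys = (t != 1)) :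
    ∀ (orig cur : List Int), cur.length < fuel →
      reqLoop (reqSolFuel fuel) 2 orig cur = true := by
  intro orig
  induction orig with
  | nil => intro cur _; simp [reqLoop]
  | cons p rest ih =>
    intro cur hlen
    have hlen' : (reqFilter p cur).length < fuel :=
      lt_of_le_of_lt (reqFilter_length_le p cur) hlen
    have hw : reqSolFuel fuel 1 (reqFilter p cur) = false := by
      simpa using IH 1 (reqFilter p cur) hlen'
    simp only [reqLoop, if_neg (by decide : ¬ ((2 : Int) == 1) = true),
      if_pos (by decide : ((2 : Int) == 2) = true)]
    rw [hw]
    simp only [Bool.false_eq_true, if_false]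
    exact ih (reqFilter p cur) hlen'

-- main evaluation lemma: with enough fuel, A's body computes `turn != 1`
lemma reqSolFuel_eval :
    ∀ (fuel : Nat) (turn : Int) (xs : List Int), xs.length < fuel →
      reqSolFuel fuel turn xs = (turn != 1) := by
  intro fuel
  induction fuel with
  | zero => intro t xs h; omega
  | succ f IH =>
    intro t xs hlen
    match xs with
    | [] =>
      simp only [reqSolFuel, List.length_nil]
      by_cases ht : t = 1 <;> simp [ht]
    | p :: rest =>
      have hpmem : p ∈ p :: rest := List.mem_cons_self ..
      have hlenf : (reqFilter p (p :: rest)).length < f := by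
        have := reqFilter_length_lt p (p :: rest) hpmem
        simp only [List.length_cons] at this hlen ⊢
        omega
      simp only [reqSolFuel, List.length_cons]
      rw [if_neg (by simp)]
      by_cases ht1 : t = 1
      · -- first iteration: winner = req_sol(2, cur') = True, so return False
        subst ht1
        have hw : reqSolFuel f 2 (reqFilter p (p :: rest)) = true := by
          simpa using IH 2 (reqFilter p (p :: rest)) hlenf
        simp only [reqLoop, if_pos (by decide : ((1 : Int) == 1) = true)]
        rw [hw]
        simp
      · by_cases ht2 : t = 2
        · -- first iteration unfolded by hand (it strictly shrinks cur, feeding reqLoop_two)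
          subst ht2
          have hw : reqSolFuel f 1 (reqFilter p (p :: rest)) = false := by
            simpa using IH 1 (reqFilter p (p :: rest)) hlenf
          simp only [reqLoop, if_neg (by decide : ¬ ((2 : Int) == 1) = true),
            if_pos (by decide : ((2 : Int) == 2) = true)]
          rw [hw]
          simp only [Bool.false_eq_true, if_false]
          rw [reqLoop_two f IH rest (reqFilter p (p :: rest)) hlenf]
          decide
        · rw [reqLoop_other (reqSolFuel f) t (by simpa using ht1) (by simpa using ht2)]
          simp [bne, ht1]

-- ===== VERDICT (by name: the statement is the Claim_ definition above) =====
theorem req_sol_spec : Claim_equal_req_sol := by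
  intro turn primes _hdom _hpre
  unfold Spec_req_sol req_sol req_sol_alt
  exact reqSolFuel_eval (primes.length + 1) turn primes (by omega)
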